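-- pv_equiv track=rewrite | github.com/kdungs/adventofcode | python/17.py | num_min_containers
-- ===== SOURCE A (Python) =====
-- def num_min_containers(containers, content):
--     if content == 0:
--         return (0, 1)
--     if content < 0 or len(containers) == 0:
--         return None
--     ps = [c for c in containers if c <= content]
--     subs = []
--     while ps:
--         p = ps[0]
--         ps = ps[1:]
--         res = num_min_containers(ps, content - p)
--         if res is not None:
--             subs.append(res)
--     if len(subs) == 0:
--         return None
--     minlen = min(subs, key=lambda s: s[0])[0]
--     ways = sum(s[1] for s in subs if s[0] == minlen)
--     return (minlen + 1, ways)
-- ===== SOURCE B (Python) =====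
-- def num_min_containers(containers, content):
--     if content == 0:
--         return (0, 1)
--     if content < 0:
--         return None
--     return _search(containers, content, content)
--
--
-- def _search(l, t, m):
--     # best (size, ways) over admissible chains from l; t = remaining target,
--     # m = minimum of all targets seen so far (an element is usable iff <= m).
--     if t == 0:
--         return (0, 1)
--     if not l:
--         return None
--     c, rest = l[0], l[1:]
--     skip = _search(rest, t, m)
--     if c <= m:
--         take = _search(rest, t - c, min(m, t - c))
--         if take is not None:
--             take = (take[0] + 1, take[1])
--     else:
--         take = None
--     if take is None:
--         return skip
--     if skip is None:
--         return take
--     if take[0] < skip[0]: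
--         return take
--     if skip[0] < take[0]:
--         return skip
--     return (take[0], take[1] + skip[1])
-- ===== Notes on version B (the rewrite author's own statement) =====
-- stated objective: alternative
-- what changed: A recurses by repeatedly filtering the list and branching over every possible next pick, aggregating min-length/way-counts per node; B is a binary include/exclude recursion over the list that threads the running minimum of remaining targets instead of re-filtering, merging the two Option results pairwise.
import Mathlib
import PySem

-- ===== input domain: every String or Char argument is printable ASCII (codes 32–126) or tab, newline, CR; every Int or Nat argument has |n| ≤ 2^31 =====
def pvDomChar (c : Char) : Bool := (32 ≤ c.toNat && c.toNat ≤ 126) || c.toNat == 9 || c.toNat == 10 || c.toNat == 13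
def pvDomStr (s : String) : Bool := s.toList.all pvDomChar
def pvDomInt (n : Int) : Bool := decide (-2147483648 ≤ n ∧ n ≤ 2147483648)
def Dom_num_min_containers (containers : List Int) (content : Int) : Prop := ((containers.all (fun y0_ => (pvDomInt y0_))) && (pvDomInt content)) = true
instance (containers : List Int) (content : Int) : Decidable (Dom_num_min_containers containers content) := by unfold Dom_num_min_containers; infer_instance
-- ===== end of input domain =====

-- B replaces A's pick-a-first-element recursion (with per-node re-filtering and per-node
-- min/sum aggregation) by a binary include/exclude recursion threading the running minimum
-- of remaining targets; same return value, similar cost ("alternative", not claimed faster).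

-- ===== PORT A =====
-- A's tail aggregation (named helper; the code after the while loop, verbatim)
def aggA (subs : List (Int × Int)) : Option (Int × Int) :=
  if subs.length = 0 then none
  else
    let minlen := match PySem.List.min? subs (fun s => s.1) with
                  | some s => s.1
                  | none => 0
    let ways := subs.foldl (fun a s => if s.1 = minlen then a + s.2 else a) 0
    some (minlen + 1, ways)

mutual
-- the core of A on tuples (the List Int in the required signature is the boundary encoding of the tuple)
def coreA (containers : List Int) (content : Int) : Option (Int × Int) :=
  if content = 0 then some (0, 1)
  else if content < 0 ∨ containers.length = 0 then none
  else
    let ps := containers.filter (fun c => c ≤ content)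
    aggA (loopA ps content)
termination_by (containers.length, 1)
decreasing_by
  simp only [Prod.lex_iff, List.length_unattach]
  exact (Nat.lt_or_eq_of_le ((List.length_filter_le _ _).trans (le_of_eq List.length_attach))).imp id (fun h => ⟨h, Nat.one_pos⟩)

-- the while loop: pop the head, recurse on the tail, collect non-None results in order
def loopA (ps : List Int) (content : Int) : List (Int × Int) :=
  match ps with
  | [] => []
  | p :: rest =>
    match coreA rest (content - p) with
    | some res => res :: loopA rest content
    | none => loopA rest content
termination_by (ps.length, 0)
decreasing_by
  · simp only [Prod.lex_iff, List.length_cons]; omega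
  · simp only [Prod.lex_iff, List.length_cons]; omega
end


def num_min_containers (containers : List Int) (content : Int) : Option (List Int) :=
  (coreA containers content).map (fun r => [r.1, r.2])

-- ===== PORT B =====
-- the trailing if-chain of _search (merging take/skip), named
def mergeB (take skip : Option (Int × Int)) : Option (Int × Int) :=
  match take, skip with
  | none, s => s
  | some r, none => some r
  | some r, some s =>
    if r.1 < s.1 then some r
    else if s.1 < r.1 then some s
    else some (r.1, r.2 + s.2)

def searchB (l : List Int) (t m : Int) : Option (Int × Int) :=
  if t = 0 then some (0, 1)
  else
    match l with
    | [] => none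
    | c :: rest =>
      let skip := searchB rest t m
      let take := if c ≤ m then (searchB rest (t - c) (min m (t - c))).map (fun r => (r.1 + 1, r.2))
                  else none
      mergeB take skip

def num_min_containers_alt (containers : List Int) (content : Int) : Option (List Int) :=
  (if content = 0 then some ((0 : Int), (1 : Int))
   else if content < 0 then none
   else searchB containers content content).map (fun r => [r.1, r.2])

-- ===== PRECONDITION & SPEC =====
def Spec_num_min_containers (containers : List Int) (content : Int) (out : Option (List Int)) : Prop := out = num_min_containers_alt containers content
instance (containers : List Int) (content : Int) (out : Option (List Int)) : Decidable (Spec_num_min_containers containers content out) := by unfold Spec_num_min_containers; infer_instance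

-- ===== CLAIM (what is proved, stated in full; the proofs are below) =====
def Claim_equal_num_min_containers : Prop := ∀ (containers : List Int) (content : Int), Dom_num_min_containers containers content → Spec_num_min_containers containers content (num_min_containers containers content)

-- ===== LEMMAS AND PROOFS =====

-- value/ways of A's aggregation, abstracted for the proofs
def mvP (L : List (Int × Int)) : Int :=
  match PySem.List.min? L (fun s => s.1) with
  | some s => s.1
  | none => 0

def wvP (L : List (Int × Int)) (v : Int) : Int :=
  L.foldl (fun a s => if s.1 = v then a + s.2 else a) 0

theorem aggA_eq (L : List (Int × Int)) :
    aggA L = if L.length = 0 then none else some (mvP L + 1, wvP L (mvP L)) := rfl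

theorem aggA_nil : aggA ([] : List (Int × Int)) = none := rfl

theorem mvP_mem {L : List (Int × Int)} (h : L ≠ []) : ∃ s ∈ L, mvP L = s.1 := by
  unfold mvP
  cases hm : PySem.List.min? L (fun s => s.1) with
  | none => exact absurd (((PySem.List.min?_eq_none_iff _ _).mp hm)) h
  | some s => exact ⟨s, PySem.List.min?_mem hm, rfl⟩

theorem mvP_min {L : List (Int × Int)} : ∀ y ∈ L, mvP L ≤ y.1 := by
  unfold mvP
  cases hm : PySem.List.min? L (fun s => s.1) with
  | none =>
    intro y hy
    rw [((PySem.List.min?_eq_none_iff _ _).mp hm)] at hy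
    simp at hy
  | some s => exact PySem.List.min?_isMin hm

theorem mvP_cons {r : Int × Int} {L : List (Int × Int)} (h : L ≠ []) :
    mvP (r :: L) = min r.1 (mvP L) := by
  apply le_antisymm
  · apply le_min
    · exact mvP_min r (by simp)
    · obtain ⟨s, hs, he⟩ := mvP_mem h
      rw [he]
      exact mvP_min s (by simp [hs])
  · obtain ⟨s, hs, he⟩ := mvP_mem (L := r :: L) (by simp)
    rcases List.mem_cons.mp hs with h1 | h1
    · rw [he, h1]
      exact min_le_left _ _
    · rw [he]
      exact le_trans (min_le_right _ _) (mvP_min s h1)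

theorem wv_shift (L : List (Int × Int)) (v : Int) : ∀ x : Int,
    L.foldl (fun a s => if s.1 = v then a + s.2 else a) x = x + wvP L v := by
  unfold wvP
  induction L with
  | nil => intro x; simp
  | cons y L ih =>
    intro x
    simp only [List.foldl_cons]
    rw [ih, ih (if y.1 = v then 0 + y.2 else 0)]
    split_ifs <;> ring

theorem wvP_cons (r : Int × Int) (L : List (Int × Int)) (v : Int) :
    wvP (r :: L) v = (if r.1 = v then r.2 else 0) + wvP L v := by
  unfold wvP
  simp only [List.foldl_cons]
  rw [wv_shift]
  split_ifs <;> simp [wvP]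

theorem wvP_zero {L : List (Int × Int)} {v : Int} (h : ∀ y ∈ L, y.1 ≠ v) : wvP L v = 0 := by
  induction L with
  | nil => rfl
  | cons y L ih =>
    rw [wvP_cons, if_neg (h y (by simp)), ih (fun z hz => h z (by simp [hz])), add_zero]

-- A's per-node aggregation = B's pairwise merge, one pick at a time
theorem merge_agg (o : Option (Int × Int)) (L : List (Int × Int)) :
    mergeB (o.map (fun r => (r.1 + 1, r.2))) (aggA L)
      = aggA (match o with | some r => r :: L | none => L) := by
  cases o with
  | none => cases aggA L <;> rfl
  | some r =>
    rcases List.eq_nil_or_concat' L with rfl | hL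
    case inl =>
      rw [aggA_nil, aggA_eq]
      have hmv : mvP [r] = r.1 := by
        obtain ⟨s, hs, he⟩ := mvP_mem (L := [r]) (by simp)
        simp at hs; rw [he, hs]
      simp [mergeB, hmv, wvP]
    case inr =>
      have hL' : L ≠ [] := by rcases hL with ⟨a, t, rfl⟩; simp
      rw [aggA_eq L, if_neg (by simp [List.length_eq_zero_iff, hL']),
          aggA_eq (r :: L), if_neg (by simp)]
      rw [mvP_cons hL']
      rcases lt_trichotomy r.1 (mvP L) with hlt | heq | hgt
      · rw [min_eq_left hlt.le]
        have hz : wvP L r.1 = 0 :=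
          wvP_zero (fun y hy => by have := mvP_min y hy; omega)
        simp only [Option.map_some, mergeB]
        rw [if_pos (by omega)]
        rw [wvP_cons, if_pos rfl, hz, add_zero]
      · rw [heq, min_self]
        simp only [Option.map_some, mergeB]
        rw [if_neg (by omega), if_neg (by omega)]
        rw [wvP_cons, if_pos heq, heq]
      · rw [min_eq_right hgt.le]
        simp only [Option.map_some, mergeB]
        rw [if_neg (by omega), if_pos (by omega)]
        rw [wvP_cons, if_neg (by omega), zero_add]

theorem searchB_zero (l : List Int) (m : Int) : searchB l 0 m = some (0, 1) := by
  cases l <;> simp [searchB]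

-- elements above the running minimum can never be picked: filtering them away is harmless
theorem searchB_filter (l : List Int) : ∀ (t m m' : Int), m' ≤ m →
    searchB l t m' = searchB (l.filter (fun c => decide (c ≤ m))) t m' := by
  induction l with
  | nil => intro t m m' _; simp
  | cons c rest ih =>
    intro t m m' hmm
    by_cases ht : t = 0
    · subst ht; rw [searchB_zero, searchB_zero]
    by_cases hc : c ≤ m
    · rw [List.filter_cons_of_pos (by simpa using hc)]
      simp only [searchB, if_neg ht]
      rw [← ih t m m' hmm]
      by_cases hc' : c ≤ m'
      · rw [if_pos hc', if_pos hc', ← ih (t - c) m (min m' (t - c)) (le_trans (min_le_left _ _) hmm)]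
      · rw [if_neg hc', if_neg hc']
    · rw [List.filter_cons_of_neg (by simpa using hc)]
      simp only [searchB, if_neg ht]
      rw [if_neg (by omega), ← ih t m m' hmm]
      rfl

theorem coreA_zero (l : List Int) : coreA l 0 = some (0, 1) := by
  rw [coreA]; rfl

-- one sweep of A's while loop vs B's skip-chain, assuming the bridge on shorter lists
theorem loop_bridge (n : Nat)
    (IH : ∀ (l : List Int) (t m : Int), l.length < n → 0 < t →
      (∀ c ∈ l, c ≤ m) → coreA l t = searchB l t (min m t))
    (t m : Int) (ht : 0 < t) :
    ∀ ps : List Int, ps.length ≤ n → (∀ c ∈ ps, c ≤ m ∧ c ≤ t) →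
      searchB ps t (min m t) = aggA (loopA ps t) := by
  have ht0 : ¬ t = 0 := by omega
  intro ps
  induction ps with
  | nil =>
    intro _ _
    rw [loopA]
    simp [searchB, ht0, aggA_nil]
  | cons p rest ihp =>
    intro hplen hmem
    have hp := hmem p (by simp)
    have hrest : searchB rest t (min m t) = aggA (loopA rest t) :=
      ihp (by simp at hplen ⊢; omega) (fun c hc => hmem c (by simp [hc]))
    have hkey : searchB rest (t - p) (min (min m t) (t - p)) = coreA rest (t - p) := by
      by_cases htp : t - p = 0
      · rw [htp, searchB_zero, coreA_zero]
      · have htp' : 0 < t - p := by omega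
        exact (IH rest (t - p) (min m t) (by simp at hplen; omega) htp'
          (fun c hc => le_min ((hmem c (by simp [hc])).1) ((hmem c (by simp [hc])).2))).symm
    have hstep : searchB (p :: rest) t (min m t)
        = mergeB ((coreA rest (t - p)).map (fun r => (r.1 + 1, r.2))) (aggA (loopA rest t)) := by
      simp only [searchB, if_neg ht0]
      rw [if_pos (le_min hp.1 hp.2), hkey, hrest]
    rw [hstep, merge_agg, loopA]

-- main bridge: A's pick-first recursion equals B's include/exclude recursion
theorem core_eq_search : ∀ (n : Nat) (l : List Int) (t m : Int), l.length ≤ n → 0 < t →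
    (∀ c ∈ l, c ≤ m) → coreA l t = searchB l t (min m t) := by
  intro n
  induction n using Nat.strong_induction_on with
  | _ n IH =>
  intro l t m hlen ht hm
  have IH' : ∀ (l : List Int) (t m : Int), l.length < n → 0 < t →
      (∀ c ∈ l, c ≤ m) → coreA l t = searchB l t (min m t) := by
    intro l' t' m' hl' ht' hm'
    exact IH l'.length hl' l' t' m' le_rfl ht' hm'
  have ht0 : ¬ t = 0 := by omega
  have ht1 : ¬ t < 0 := by omega
  cases l with
  | nil =>
    rw [coreA]
    simp [searchB, ht0, ht1]
  | cons a l0 =>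
    rw [coreA, if_neg ht0, if_neg (by simp [ht1])]
    show aggA (loopA ((a :: l0).filter (fun c => decide (c ≤ t))) t) = _
    have hfil : searchB (a :: l0) t (min m t)
        = searchB ((a :: l0).filter (fun c => decide (c ≤ t))) t (min m t) :=
      searchB_filter (a :: l0) t t (min m t) (min_le_right _ _)
    rw [hfil, loop_bridge n IH' t m ht ((a :: l0).filter (fun c => decide (c ≤ t)))
      (le_trans (List.length_filter_le _ _) hlen)
      (fun c hc => ⟨hm c (List.mem_of_mem_filter hc), by
        have := List.of_mem_filter hc; simpa using this⟩)]

-- ===== VERDICT (by name: the statement is the Claim_ definition above) =====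
theorem num_min_containers_spec : Claim_equal_num_min_containers := by
  intro containers content _
  unfold Spec_num_min_containers num_min_containers num_min_containers_alt
  by_cases hc0 : content = 0
  · subst hc0
    rw [coreA]
    rfl
  by_cases hneg : content < 0
  · rw [coreA, if_neg hc0, if_pos (Or.inl hneg), if_neg hc0, if_pos hneg]
  have hpos : 0 < content := by omega
  rw [if_neg hc0, if_neg hneg]
  congr 1
  cases containers with
  | nil =>
    rw [coreA]
    simp [searchB, hc0, hneg]
  | cons a l0 =>
    rw [coreA, if_neg hc0, if_neg (by simp; omega)]
    show aggA (loopA ((a :: l0).filter (fun c => decide (c ≤ content))) content) = _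
    have hfil : searchB (a :: l0) content content
        = searchB ((a :: l0).filter (fun c => decide (c ≤ content))) content content :=
      searchB_filter (a :: l0) content content content le_rfl
    have hb := loop_bridge (a :: l0).length
      (fun l' t' m' hl' ht' hm' => core_eq_search l'.length l' t' m' le_rfl ht' hm')
      content content hpos ((a :: l0).filter (fun c => decide (c ≤ content)))
      (List.length_filter_le _ _)
      (fun c hc => ⟨by have := List.of_mem_filter hc; simpa using this,
                    by have := List.of_mem_filter hc; simpa using this⟩)
    rw [min_self] at hb
    rw [hfil, hb]
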